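-- pv_equiv track=rewrite | github.com/craighillelson/snow_reporting | filter_incidents_not_created_by_humans.py | filtered_dct
-- ===== SOURCE A (Python) =====
-- def filtered_dct(a, b):
--     """ return an enumerated dictionary containing filtered incidents """
--     finalized_dct = {}
--
--     for num, (incident_num, short_description) in \
--               enumerate(a.items(), 1):
--         check = any(item in short_description for item in b)
--         if check is True:
--             pass
--         else:
--             finalized_dct[incident_num] = short_description
--
--     return finalized_dct
-- ===== SOURCE B (Python) =====
-- def filtered_dct(a, b):
--     """ return an enumerated dictionary containing filtered incidents """
--     pats = tuple(b)
--     return {incident_num: short_description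
--             for incident_num, short_description in a.items()
--             if not _mentions_any(short_description, pats)}
--
--
-- def _mentions_any(text, pats):
--     """single left-to-right scan of text: at each offset test every pattern as a prefix"""
--     for p in pats:
--         if p == "":
--             return True
--     for i in range(len(text)):
--         if text.startswith(pats, i):
--             return True
--     return False
-- ===== Notes on version B (the rewrite author's own statement) =====
-- stated objective: alternative
-- what changed: replaces per-pattern substring searches (any(item in desc)) by a single left-to-right offset scan of each description testing every pattern as a prefix at each position, and builds the result with a dict comprehension instead of an enumerate loop
import Mathlib
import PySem

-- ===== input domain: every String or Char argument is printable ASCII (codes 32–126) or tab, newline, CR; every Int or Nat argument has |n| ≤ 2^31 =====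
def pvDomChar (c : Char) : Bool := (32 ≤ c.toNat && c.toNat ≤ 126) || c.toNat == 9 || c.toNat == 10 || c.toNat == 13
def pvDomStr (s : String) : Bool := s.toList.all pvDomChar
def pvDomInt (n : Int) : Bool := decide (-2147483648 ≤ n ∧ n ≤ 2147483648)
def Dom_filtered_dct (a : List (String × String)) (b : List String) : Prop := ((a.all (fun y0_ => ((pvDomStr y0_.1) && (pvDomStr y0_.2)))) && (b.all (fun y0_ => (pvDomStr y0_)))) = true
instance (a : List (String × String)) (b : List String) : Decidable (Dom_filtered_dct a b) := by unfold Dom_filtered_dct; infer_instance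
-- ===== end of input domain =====

-- B replaces the per-pattern substring searches by a single offset scan of each
-- description testing every pattern as a prefix at each position (alternative, same cost).


-- ===== PORT A =====
def filtered_dct (a : List (String × String)) (b : List String) : List (String × String) :=
  ((PySem.List.enumerate a 1).foldl
    (fun finalized_dct p =>
      let check := b.any (fun item => PySem.Str.isIn item p.2.2)
      if check = true then finalized_dct
      else finalized_dct.insert p.2.1 p.2.2)
    PySem.Dict.empty).items

-- ===== PORT B =====
def pvMentionsAny (text : String) (patterns : List String) : Bool :=
  if patterns.any (fun p => p == "") then true
  else (List.range text.toList.length).any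
    (fun i => patterns.any (fun p => PySem.Chars.startswith (text.toList.drop i) p.toList))

def filtered_dct_alt (a : List (String × String)) (b : List String) : List (String × String) :=
  (PySem.Dict.ofList (a.filter (fun kv => !(pvMentionsAny kv.2 b)))).items

-- ===== PRECONDITION & SPEC =====
def Spec_filtered_dct (a : List (String × String)) (b : List String) (out : List (String × String)) : Prop := out = filtered_dct_alt a b
instance (a : List (String × String)) (b : List String) (out : List (String × String)) : Decidable (Spec_filtered_dct a b out) := by unfold Spec_filtered_dct; infer_instance

-- ===== CLAIM (what is proved, stated in full; the proofs are below) =====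
def Claim_equal_filtered_dct : Prop := ∀ (a : List (String × String)) (b : List String), Dom_filtered_dct a b → Spec_filtered_dct a b (filtered_dct a b)

-- ===== LEMMAS AND PROOFS =====

lemma pv_toList_nil_iff (p : String) : p.toList = [] ↔ p = "" :=
  String.toList_eq_nil_iff

-- B's scan finds a pattern iff some pattern is a substring (Python's `in`).
lemma pv_pred_eq (s : String) (pats : List String) :
    pvMentionsAny s pats = pats.any (fun p => PySem.Str.isIn p s) := by
  unfold pvMentionsAny
  by_cases hemp : pats.any (fun p => p == "") = true
  · rw [if_pos hemp]
    symm
    rw [List.any_eq_true] at hemp ⊢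
    obtain ⟨p, hp, hpe⟩ := hemp
    have hpe' : p = "" := by simpa using hpe
    subst hpe'
    exact ⟨"", hp, by simp [PySem.Chars.isIn_nil]⟩
  · rw [if_neg hemp]
    apply Bool.eq_iff_iff.mpr
    simp only [List.any_eq_true, List.mem_range]
    constructor
    · rintro ⟨i, hi, p, hp, hsw⟩
      refine ⟨p, hp, ?_⟩
      rw [PySem.Str.isIn_eq, ← PySem.Chars.exists_prefix_drop_iff_isIn]
      exact ⟨i, (PySem.Chars.startswith_iff _ _).mp hsw⟩
    · rintro ⟨p, hp, hin⟩
      rw [PySem.Str.isIn_eq, ← PySem.Chars.exists_prefix_drop_iff_isIn] at hin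
      obtain ⟨j, hpre⟩ := hin
      have hpne : p.toList ≠ [] := by
        intro h0
        exact hemp (List.any_eq_true.mpr ⟨p, hp, by simp [(pv_toList_nil_iff p).mp h0]⟩)
      have hj : j < s.toList.length := by
        by_contra hge
        rw [not_lt] at hge
        rw [List.drop_eq_nil_of_le hge] at hpre
        exact hpne (List.prefix_nil.mp hpre)
      exact ⟨j, hj, p, hp, (PySem.Chars.startswith_iff _ _).mpr hpre⟩

-- iterating enumerate(a, 1) while ignoring the counter is iterating a
lemma pv_foldA (l : List (String × String)) (n : Int) (b : List String)
    (d : PySem.Dict String String) :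
    (PySem.List.enumerate l n).foldl
      (fun finalized_dct p =>
        let check := b.any (fun item => PySem.Str.isIn item p.2.2)
        if check = true then finalized_dct
        else finalized_dct.insert p.2.1 p.2.2) d
    = l.foldl
      (fun finalized_dct kv =>
        if (b.any (fun item => PySem.Str.isIn item kv.2)) = true then finalized_dct
        else finalized_dct.insert kv.1 kv.2) d := by
  induction l generalizing n d with
  | nil => rfl
  | cons x xs ih =>
      rw [PySem.List.enumerate_cons, List.foldl_cons, List.foldl_cons, ih]

-- a conditional-insert loop is the insert loop over the filtered list
lemma pv_foldB (l : List (String × String)) (P : String × String → Bool)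
    (d : PySem.Dict String String) :
    l.foldl (fun fin kv => if P kv = true then fin else fin.insert kv.1 kv.2) d
    = (l.filter (fun kv => !P kv)).foldl (fun fin kv => fin.insert kv.1 kv.2) d := by
  induction l generalizing d with
  | nil => rfl
  | cons x xs ih =>
      by_cases h : P x = true <;> simp [h, ih]

-- ===== VERDICT (by name: the statement is the Claim_ definition above) =====
theorem filtered_dct_spec : Claim_equal_filtered_dct := by
  intro a b _
  unfold Spec_filtered_dct filtered_dct filtered_dct_alt
  rw [pv_foldA, pv_foldB]
  have hfilter : a.filter (fun kv => !(b.any (fun item => PySem.Str.isIn item kv.2)))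
      = a.filter (fun kv => !(pvMentionsAny kv.2 b)) := by
    apply List.filter_congr
    intro kv _
    rw [pv_pred_eq]
  rw [hfilter]
  rfl
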